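-- pv_equiv track=rewrite | github.com/groselt/AoC | 2020/day11.py | p1_get_nr_occupied_neighbours
-- ===== SOURCE A (Python) =====
-- from typing import List
--
-- def p1_get_nr_occupied_neighbours(floor_map: List[str], x: int, y:int) -> int:
--     def is_safe(x,y) -> bool:
--         return 0 <= y < len(floor_map) and 0 <= x < len(floor_map[y])
--     result: int = 0
--     positions = [(-1,-1), (-1,0), (-1,1), (0,-1), (0,1), (1,-1), (1,0), (1,1)]
--     for i, j in positions:
--         if is_safe(x+i, y+j) and floor_map[y+j][x+i] == '#':
--             result += 1
--     return result
-- ===== SOURCE B (Python) =====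
-- from typing import List
--
-- def p1_get_nr_occupied_neighbours(floor_map: List[str], x: int, y: int) -> int:
--     lo, hi = max(0, x - 1), max(0, x + 2)
--     total = 0
--     for ry in range(max(0, y - 1), min(len(floor_map), y + 2)):
--         for c in floor_map[ry][lo:hi]:
--             if c == '#':
--                 total += 1
--     if 0 <= y < len(floor_map) and 0 <= x < len(floor_map[y]) and floor_map[y][x] == '#':
--         total -= 1
--     return total
-- ===== Notes on version B (the rewrite author's own statement) =====
-- stated objective: alternative
-- what changed: B scans the clamped 3x3 block row-by-row with Python slicing (one clamped substring per in-range row, counting '#' in it) and subtracts the centre cell once, instead of A's eight individual offset point-checks with a per-cell bounds guard.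
import Mathlib
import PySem

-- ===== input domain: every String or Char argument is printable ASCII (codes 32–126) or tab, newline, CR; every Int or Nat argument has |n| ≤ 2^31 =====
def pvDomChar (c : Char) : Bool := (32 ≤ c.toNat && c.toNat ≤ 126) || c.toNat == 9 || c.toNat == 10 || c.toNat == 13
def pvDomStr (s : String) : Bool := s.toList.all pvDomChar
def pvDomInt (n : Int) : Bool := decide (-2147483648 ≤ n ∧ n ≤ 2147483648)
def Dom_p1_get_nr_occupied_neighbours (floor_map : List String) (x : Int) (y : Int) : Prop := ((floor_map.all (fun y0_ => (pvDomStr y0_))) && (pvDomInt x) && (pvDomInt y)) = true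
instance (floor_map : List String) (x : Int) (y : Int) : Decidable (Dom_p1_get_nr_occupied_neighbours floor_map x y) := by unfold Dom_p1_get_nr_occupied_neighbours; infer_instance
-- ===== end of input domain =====

-- B counts '#' in one clamped 3-wide slice per in-range row of the 3x3 block and subtracts the
-- centre cell once, instead of A's eight individual offset point-checks; same cost, different shape.

-- ===== PORT A =====
-- is_safe(x, y) of A (len(floor_map[y]) only reached under the 0 <= y < len guard, as in Python)
def pvIsSafe (floor_map : List String) (x : Int) (y : Int) : Bool :=
  decide (0 ≤ y) && decide (y < (floor_map.length : Int)) && decide (0 ≤ x) &&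
    decide (x < PySem.Str.len (PySem.List.pyGetD floor_map y ""))

def p1_get_nr_occupied_neighbours (floor_map : List String) (x : Int) (y : Int) : Int :=
  let positions : List (Int × Int) := [(-1,-1), (-1,0), (-1,1), (0,-1), (0,1), (1,-1), (1,0), (1,1)]
  positions.foldl (fun result ij =>
    if pvIsSafe floor_map (x + ij.1) (y + ij.2) &&
        (PySem.Str.pyGet? (PySem.List.pyGetD floor_map (y + ij.2) "") (x + ij.1) == some '#')
    then result + 1 else result) 0

-- ===== PORT B =====
-- the centre guard of Source B ('0 <= y < len(...) and 0 <= x < len(...) and floor_map[y][x] == '#'')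
def pvCentreOccupied (floor_map : List String) (x : Int) (y : Int) : Bool :=
  decide (0 ≤ y) && decide (y < (floor_map.length : Int)) && decide (0 ≤ x) &&
    decide (x < PySem.Str.len (PySem.List.pyGetD floor_map y "")) &&
    (PySem.Str.pyGet? (PySem.List.pyGetD floor_map y "") x == some '#')

def p1_get_nr_occupied_neighbours_alt (floor_map : List String) (x : Int) (y : Int) : Int :=
  let lo : Int := max 0 (x - 1)
  let hi : Int := max 0 (x + 2)
  let total : Int :=
    (PySem.List.pyRange (max 0 (y - 1)) (min (floor_map.length : Int) (y + 2)) 1).foldl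
      (fun total ry =>
        ((PySem.Str.slice (PySem.List.pyGetD floor_map ry "") (some lo) (some hi)).toList).foldl
          (fun t c => if c == '#' then t + 1 else t) total) 0
  if pvCentreOccupied floor_map x y then total - 1 else total

-- ===== PRECONDITION & SPEC =====
def Spec_p1_get_nr_occupied_neighbours (floor_map : List String) (x : Int) (y : Int) (out : Int) : Prop := out = p1_get_nr_occupied_neighbours_alt floor_map x y
instance (floor_map : List String) (x : Int) (y : Int) (out : Int) : Decidable (Spec_p1_get_nr_occupied_neighbours floor_map x y out) := by unfold Spec_p1_get_nr_occupied_neighbours; infer_instance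

-- ===== CLAIM (what is proved, stated in full; the proofs are below) =====
def Claim_equal_p1_get_nr_occupied_neighbours : Prop := ∀ (floor_map : List String) (x : Int) (y : Int), Dom_p1_get_nr_occupied_neighbours floor_map x y → Spec_p1_get_nr_occupied_neighbours floor_map x y (p1_get_nr_occupied_neighbours floor_map x y)

-- ===== LEMMAS AND PROOFS =====

-- 0/1 contribution of one cell, phrased with A's own guard
def pvChk (floor_map : List String) (cx : Int) (ry : Int) : Int :=
  if pvIsSafe floor_map cx ry &&
      (PySem.Str.pyGet? (PySem.List.pyGetD floor_map ry "") cx == some '#') then 1 else 0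

-- contribution of the three cells of one row of the 3x3 block
def pvRow (floor_map : List String) (x : Int) (ry : Int) : Int :=
  pvChk floor_map (x - 1) ry + pvChk floor_map x ry + pvChk floor_map (x + 1) ry

lemma pvIteAdd (c : Bool) (r : Int) : (if c then r + 1 else r) = r + (if c then 1 else 0) := by
  cases c <;> simp

-- A is the sum of the eight neighbour-cell contributions
lemma pvA_eq (fm : List String) (x y : Int) :
    p1_get_nr_occupied_neighbours fm x y =
      pvChk fm (x - 1) (y - 1) + pvChk fm (x - 1) y + pvChk fm (x - 1) (y + 1) +
      pvChk fm x (y - 1) + pvChk fm x (y + 1) +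
      pvChk fm (x + 1) (y - 1) + pvChk fm (x + 1) y + pvChk fm (x + 1) (y + 1) := by
  simp only [p1_get_nr_occupied_neighbours, List.foldl, pvIteAdd, pvChk, ← sub_eq_add_neg,
    add_zero, zero_add]

lemma pvChk_zero (fm : List String) (cx ry : Int) (h : ¬ (0 ≤ ry ∧ ry < (fm.length : Int))) :
    pvChk fm cx ry = 0 := by
  simp only [pvChk, pvIsSafe]
  rw [if_neg]
  simp only [Bool.and_eq_true, decide_eq_true_eq]
  tauto

lemma pvRow_zero (fm : List String) (x ry : Int) (h : ¬ (0 ≤ ry ∧ ry < (fm.length : Int))) :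
    pvRow fm x ry = 0 := by
  simp [pvRow, pvChk_zero fm _ ry h]

-- the cell contribution as a dite over a Nat index, for rows that exist
lemma pvChk_eq_dite (fm : List String) (cx ry : Int) (h0 : 0 ≤ ry) (h1 : ry < (fm.length : Int)) :
    pvChk fm cx ry =
      if 0 ≤ cx then
        (if h : cx.toNat < (PySem.List.pyGetD fm ry "").toList.length then
          (if (PySem.List.pyGetD fm ry "").toList[cx.toNat] = '#' then (1:Int) else 0) else 0)
      else 0 := by
  simp only [pvChk, pvIsSafe, PySem.Str.len_eq, PySem.Str.pyGet?_eq, PySem.Chars.pyGet?_eq_listPyGet?]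
  by_cases hx : 0 ≤ cx
  · rw [if_pos hx]
    by_cases hlt : cx.toNat < (PySem.List.pyGetD fm ry "").toList.length
    · rw [dif_pos hlt]
      have hint : cx < ((PySem.List.pyGetD fm ry "").toList.length : Int) := by omega
      simp only [PySem.List.pyGet?_of_nonneg _ hx, List.getElem?_eq_getElem hlt, h0, h1, hx, hint,
        decide_true, Bool.true_and, Option.some.injEq, beq_iff_eq]
    · rw [dif_neg hlt, if_neg]
      simp only [Bool.and_eq_true, decide_eq_true_eq]
      rintro ⟨⟨⟨⟨-, -⟩, -⟩, hlen⟩, -⟩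
      omega
  · rw [if_neg hx, if_neg]
    simp only [Bool.and_eq_true, decide_eq_true_eq]
    rintro ⟨⟨⟨⟨-, -⟩, hx'⟩, -⟩, -⟩
    omega

-- counting a predicate in a clamped take/drop window as a sum of per-index contributions
lemma pvCountP_take_drop (cs : List Char) (a n : Nat) :
    (((cs.drop a).take n).countP (· == '#') : Int) =
      ∑ k ∈ Finset.range n, (if h : a + k < cs.length then (if cs[a + k] = '#' then (1:Int) else 0) else 0) := by
  induction n with
  | zero => simp
  | succ n ih =>
      rw [List.take_add_one, List.countP_append, Finset.sum_range_succ, ← ih]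
      push_cast
      congr 1
      rw [List.getElem?_drop]
      by_cases h : a + n < cs.length
      · have : cs[a + n]? = some cs[a + n] := by simp [h]
        rw [this, dif_pos h]
        by_cases hc : cs[a + n] = '#' <;> simp [hc]
      · have : cs[a + n]? = none := by simp; omega
        rw [this, dif_neg h]
        simp

-- B's inner loop over one clamped row slice adds exactly the three cell contributions of that row
lemma pvRowCount (fm : List String) (x ry t : Int) (h0 : 0 ≤ ry) (h1 : ry < (fm.length : Int)) :
    ((PySem.Str.slice (PySem.List.pyGetD fm ry "") (some (max 0 (x - 1))) (some (max 0 (x + 2)))).toList).foldl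
        (fun t c => if c == '#' then t + 1 else t) t
      = t + pvRow fm x ry := by
  have hlo : max 0 (x - 1) = (((max 0 (x - 1)).toNat : Nat) : Int) := by omega
  have hhi : max 0 (x + 2) = (((max 0 (x + 2)).toNat : Nat) : Int) := by omega
  rw [PySem.Str.toList_slice, PySem.Chars.slice_eq_listSlice, hlo, hhi,
    PySem.List.slice_natCast, PySem.List.foldl_count_if, pvCountP_take_drop]
  set cs := (PySem.List.pyGetD fm ry "").toList with hcs
  rw [pvRow, pvChk_eq_dite fm (x-1) ry h0 h1, pvChk_eq_dite fm x ry h0 h1,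
    pvChk_eq_dite fm (x+1) ry h0 h1, ← hcs]
  have hcase : x ≤ -2 ∨ x = -1 ∨ x = 0 ∨ 1 ≤ x := by omega
  rcases hcase with h | h | h | h
  · have ha : (max 0 (x - 1)).toNat = 0 := by omega
    have hb : (max 0 (x + 2)).toNat = 0 := by omega
    have c2 : ¬ (0 ≤ x) := by omega
    have c3 : ¬ (0 ≤ x + 1) := by omega
    simp [ha, hb, c2, c3]
    exact fun h' => absurd h' (by omega)
  · subst h
    norm_num [Finset.sum_range_succ]
  · subst h
    have h2 : (2 : Int).toNat = 2 := rfl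
    norm_num [Finset.sum_range_succ, h2]
    ring_nf
  · have ha : (max 0 (x - 1)).toNat = (x - 1).toNat := by omega
    have hb : (max 0 (x + 2)).toNat = (x - 1).toNat + 3 := by omega
    have c1 : (0 ≤ x - 1) := by omega
    have c2 : (0 ≤ x) := by omega
    have c3 : (0 ≤ x + 1) := by omega
    have t2 : x.toNat = (x - 1).toNat + 1 := by omega
    have t3 : (x + 1).toNat = (x - 1).toNat + 2 := by omega
    rw [ha, hb, t2, t3]
    have hn : (x - 1).toNat + 3 - (x - 1).toNat = 3 := by omega
    rw [hn]
    norm_num [Finset.sum_range_succ, if_pos c1, if_pos c2, if_pos c3]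
    all_goals intro h'
    all_goals exact absurd h' (by omega)

lemma pvPyRange_nil (a b : Int) (h : b ≤ a) : PySem.List.pyRange a b 1 = [] := by
  simp [PySem.List.pyRange, if_neg (by omega : ¬ a < b)]

-- B's outer loop over the clamped row range yields the three row contributions
lemma pvOuter (fm : List String) (x y : Int) :
    (PySem.List.pyRange (max 0 (y - 1)) (min (fm.length : Int) (y + 2)) 1).foldl
        (fun total ry =>
          ((PySem.Str.slice (PySem.List.pyGetD fm ry "") (some (max 0 (x - 1))) (some (max 0 (x + 2)))).toList).foldl
            (fun t c => if c == '#' then t + 1 else t) total) 0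
      = pvRow fm x (y - 1) + pvRow fm x y + pvRow fm x (y + 1) := by
  set a := max 0 (y - 1) with hadef
  set b := min (fm.length : Int) (y + 2) with hbdef
  have hrw : (PySem.List.pyRange a b 1).foldl
      (fun total ry =>
        ((PySem.Str.slice (PySem.List.pyGetD fm ry "") (some (max 0 (x - 1))) (some (max 0 (x + 2)))).toList).foldl
          (fun t c => if c == '#' then t + 1 else t) total) 0
      = (PySem.List.pyRange a b 1).foldl (fun total ry => total + pvRow fm x ry) 0 := by
    apply PySem.List.foldl_congr_mem
    intro acc ry hry
    rw [PySem.List.mem_pyRange_one] at hry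
    exact pvRowCount fm x ry acc (by omega) (by omega)
  rw [hrw]
  have hz : ∀ ry : Int, (y - 1 ≤ ry ∧ ry ≤ y + 1 ∧ ¬ (a ≤ ry ∧ ry < b)) → pvRow fm x ry = 0 := by
    intro ry hr
    apply pvRow_zero fm x ry
    omega
  by_cases hab : b ≤ a
  · rw [pvPyRange_nil a b hab, List.foldl_nil,
      hz (y-1) (by omega), hz y (by omega), hz (y+1) (by omega)]
    norm_num
  · rw [not_le] at hab
    have h3 : b = a + 1 ∨ b = a + 2 ∨ b = a + 3 := by omega
    rcases h3 with hb3 | hb3 | hb3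
    · rw [PySem.List.pyRange_one_cons (by omega), pvPyRange_nil (a+1) b (by omega)]
      simp only [List.foldl_cons, List.foldl_nil, zero_add]
      have haval : a = y - 1 ∨ a = y ∨ a = y + 1 := by omega
      rcases haval with h | h | h <;> rw [h]
      · rw [hz y (by omega), hz (y+1) (by omega)]; ring
      · rw [hz (y-1) (by omega), hz (y+1) (by omega)]; ring
      · rw [hz (y-1) (by omega), hz y (by omega)]; ring
    · rw [PySem.List.pyRange_one_cons (by omega), PySem.List.pyRange_one_cons (by omega),
        pvPyRange_nil (a+1+1) b (by omega)]
      simp only [List.foldl_cons, List.foldl_nil, zero_add]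
      have haval : a = y - 1 ∨ a = y := by omega
      rcases haval with h | h <;> rw [h]
      · have e1 : y - 1 + 1 = y := by ring
        rw [e1, hz (y+1) (by omega)]; ring
      · rw [hz (y-1) (by omega)]; ring
    · rw [PySem.List.pyRange_one_cons (by omega), PySem.List.pyRange_one_cons (by omega),
        PySem.List.pyRange_one_cons (by omega), pvPyRange_nil (a+1+1+1) b (by omega)]
      simp only [List.foldl_cons, List.foldl_nil, zero_add]
      have h : a = y - 1 := by omega
      rw [h]
      have e1 : y - 1 + 1 = y := by ring
      rw [e1]

-- the centre guard of B is A's guard && the occupancy test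
lemma pvCentre_eq (fm : List String) (x y : Int) :
    pvCentreOccupied fm x y =
      (pvIsSafe fm x y && (PySem.Str.pyGet? (PySem.List.pyGetD fm y "") x == some '#')) := rfl

-- ===== VERDICT (by name: the statement is the Claim_ definition above) =====
theorem p1_get_nr_occupied_neighbours_spec : Claim_equal_p1_get_nr_occupied_neighbours := by
  intro fm x y _
  unfold Spec_p1_get_nr_occupied_neighbours
  rw [pvA_eq]
  show _ = p1_get_nr_occupied_neighbours_alt fm x y
  simp only [p1_get_nr_occupied_neighbours_alt]
  rw [pvOuter, pvCentre_eq]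
  have hcen : (if (pvIsSafe fm x y && (PySem.Str.pyGet? (PySem.List.pyGetD fm y "") x == some '#')) = true
      then pvRow fm x (y - 1) + pvRow fm x y + pvRow fm x (y + 1) - 1
      else pvRow fm x (y - 1) + pvRow fm x y + pvRow fm x (y + 1))
      = pvRow fm x (y - 1) + pvRow fm x y + pvRow fm x (y + 1) - pvChk fm x y := by
    rw [pvChk]
    split_ifs <;> ring
  rw [hcen]
  simp only [pvRow]
  ring
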